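-- pv_equiv track=rewrite | github.com/jerrt2003/leetcode-in-python | 548_Split_Array_with_Equal_Sum/solution.py | dfs
-- ===== SOURCE A (Python) =====
-- from typing import List, Set
--
-- def dfs(nums: List[int]) -> Set[int]:
--     total = sum(nums)
--     prefix_sum = [0 for _ in range(len(nums))]
--     cur_sum = 0
--     for i in range(0, len(nums)):
--         cur_sum += nums[i]
--         prefix_sum[i] = cur_sum
--     return {
--         prefix_sum[i - 1]
--         for i in range(1, len(nums))
--         if total - prefix_sum[i] == prefix_sum[i - 1]
--     }
-- ===== SOURCE B (Python) =====
-- def dfs(nums):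
--     # divide-and-conquer: recursively split the array; a position i >= 1 contributes
--     # its prefix sum p = sum(nums[:i]) exactly when 2*p + nums[i] == total
--     # (algebraically the same as prefix-before == suffix-after).
--     total = sum(nums)
--     def go(base, seg):
--         # candidate prefix values inside segment seg, whose prefix sum before it is base
--         if not seg:
--             return set()
--         if len(seg) == 1:
--             return {base} if 2 * base + seg[0] == total else set()
--         m = len(seg) // 2
--         left = seg[:m]
--         return go(base, left) | go(base + sum(left), seg[m:])
--     return go(nums[0], nums[1:]) if nums else set()
-- ===== Notes on version B (the rewrite author's own statement) =====
-- stated objective: alternative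
-- what changed: B replaces A's linear prefix-sum-table pass by a divide-and-conquer recursion: it splits the array in halves, solves each half with its base prefix sum, and unions the candidate sets, testing the algebraic condition 2*prefix + nums[i] == total instead of comparing prefix and suffix sums.
import Mathlib
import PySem

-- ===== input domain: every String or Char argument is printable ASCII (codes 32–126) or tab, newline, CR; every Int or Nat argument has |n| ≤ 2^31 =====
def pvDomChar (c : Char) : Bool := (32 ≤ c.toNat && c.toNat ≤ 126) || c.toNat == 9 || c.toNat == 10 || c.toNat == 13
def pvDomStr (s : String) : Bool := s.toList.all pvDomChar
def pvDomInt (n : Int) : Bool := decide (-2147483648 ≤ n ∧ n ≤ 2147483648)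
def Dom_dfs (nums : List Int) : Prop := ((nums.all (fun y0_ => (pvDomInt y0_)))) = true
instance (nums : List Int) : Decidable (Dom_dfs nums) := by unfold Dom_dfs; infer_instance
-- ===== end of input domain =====

-- B replaces A's prefix-sum-table pass by a divide-and-conquer recursion over array halves
-- with the split condition rewritten algebraically (objective: alternative).

-- ===== PORT A =====
def dfs (nums : List Int) : List Int :=
  let total := nums.sum
  let n : Int := (nums.length : Int)
  let prefix0 : List Int := (PySem.List.pyRange 0 n 1).map (fun _ => (0 : Int))
  let st := (PySem.List.pyRange 0 n 1).foldl
      (fun (st : List Int × Int) i =>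
        let cur := st.2 + PySem.List.pyGetD nums i 0
        (PySem.List.pySetD st.1 i cur, cur))
      (prefix0, 0)
  let prefix_sum := st.1
  (PySem.List.pyRange 1 n 1).foldl
    (fun s i =>
      if total - PySem.List.pyGetD prefix_sum i 0 = PySem.List.pyGetD prefix_sum (i - 1) 0 then
        PySem.Set.add s (PySem.List.pyGetD prefix_sum (i - 1) 0)
      else s)
    PySem.Set.empty

-- ===== PORT B =====
-- the nested helper 'go' of Source B; 'seg[0]' is read with pyGetD (exact: only reached with len(seg) = 1)
def dfsAltGo (total base : Int) (seg : List Int) : List Int :=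
  if seg = [] then PySem.Set.empty
  else if seg.length = 1 then
    (if 2 * base + PySem.List.pyGetD seg 0 0 = total then
      PySem.Set.add PySem.Set.empty base
    else PySem.Set.empty)
  else
    let m : Int := PySem.Int.floordiv (seg.length : Int) 2
    let left := PySem.List.slice seg none (some m)
    PySem.Set.union (dfsAltGo total base left)
      (dfsAltGo total (base + left.sum) (PySem.List.slice seg (some m) none))
termination_by seg.length
decreasing_by
  · have hm : PySem.Int.floordiv ((seg.length : Nat) : Int) 2 = (((seg.length / 2 : Nat)) : Int) := by
      simp [PySem.Int.floordiv, Int.fdiv_eq_ediv]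
    rw [hm, PySem.List.slice_to_natCast, List.length_take]
    have : seg.length ≠ 0 := fun h => ‹¬ seg = []› (List.eq_nil_of_length_eq_zero h)
    omega
  · have hm : PySem.Int.floordiv ((seg.length : Nat) : Int) 2 = (((seg.length / 2 : Nat)) : Int) := by
      simp [PySem.Int.floordiv, Int.fdiv_eq_ediv]
    rw [hm, PySem.List.slice_from_natCast, List.length_drop]
    have h2 : seg.length ≠ 1 := ‹¬ seg.length = 1›
    have : seg.length ≠ 0 := fun h => ‹¬ seg = []› (List.eq_nil_of_length_eq_zero h)
    omega

def dfs_alt (nums : List Int) : List Int :=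
  let total := nums.sum
  match nums with
  | [] => PySem.Set.empty
  | x :: xs => dfsAltGo total x xs

-- ===== PRECONDITION & SPEC =====
def Spec_dfs (nums : List Int) (out : List Int) : Prop := out = dfs_alt nums
instance (nums : List Int) (out : List Int) : Decidable (Spec_dfs nums out) := by unfold Spec_dfs; infer_instance

-- ===== CLAIM (what is proved, stated in full; the proofs are below) =====
def Claim_equal_dfs : Prop := ∀ (nums : List Int), Dom_dfs nums → Spec_dfs nums (dfs nums)

-- ===== LEMMAS AND PROOFS =====

-- prefix sum of the first i elements (i an Int index)
def pvP (nums : List Int) (i : Int) : Int := (nums.take i.toNat).sum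

-- canonical step A's final comprehension reduces to
def pvStep (nums : List Int) (s : List Int) (i : Int) : List Int :=
  if nums.sum - pvP nums (i + 1) = pvP nums i then PySem.Set.add s (pvP nums i) else s

-- candidate prefix values of a segment whose preceding prefix sum is base
def pvCands (total base : Int) : List Int → List Int
  | [] => []
  | x :: xs => (if 2 * base + x = total then [base] else []) ++ pvCands total (base + x) xs

lemma pvP_succ (nums : List Int) (a : Nat) (h : a < nums.length) :
    pvP nums ((a : Int) + 1) = pvP nums a + PySem.List.pyGetD nums (a : Int) 0 := by
  simp [pvP, PySem.List.pyGetD_natCast]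
  rw [List.getElem?_eq_getElem h, Option.getD_some]
  exact List.sum_take_succ nums a h

lemma pv_take_succ_set {α : Type} (l : List α) : ∀ (a : Nat), a < l.length → ∀ (v : α),
    (l.set a v).take (a + 1) = l.take a ++ [v] := by
  induction l with
  | nil => intro a h; simp at h
  | cons x xs ih =>
    intro a h v
    cases a with
    | zero => simp
    | succ a => simp [ih a (by simpa using h) v]

lemma pvTableA (nums : List Int) :
    ∀ (k a : Nat) (tbl : List Int), a + k = nums.length → tbl.length = nums.length →
    ((PySem.List.pyRange (a : Int) (nums.length : Int) 1).foldl
        (fun (st : List Int × Int) i =>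
          let cur := st.2 + PySem.List.pyGetD nums i 0
          (PySem.List.pySetD st.1 i cur, cur))
        (tbl, pvP nums a)).1
      = tbl.take a ++ (List.range k).map (fun (j : Nat) => pvP nums (((a + j + 1 : Nat)) : Int)) := by
  intro k
  induction k with
  | zero =>
    intro a tbl ha htbl
    rw [PySem.List.pyRange_one_eq_nil (by omega)]
    simp [show tbl.length ≤ a by omega]
  | succ k ih =>
    intro a tbl ha htbl
    rw [PySem.List.pyRange_one_cons (by omega : (a : Int) < (nums.length : Int))]
    rw [List.foldl_cons]
    show ((PySem.List.pyRange ((a:Int)+1) (nums.length:Int) 1).foldl _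
      (PySem.List.pySetD tbl (a:Int) (pvP nums a + PySem.List.pyGetD nums (a:Int) 0),
       pvP nums a + PySem.List.pyGetD nums (a:Int) 0)).1 = _
    rw [show (pvP nums a + PySem.List.pyGetD nums (a : Int) 0) = pvP nums ((a : Int) + 1) from
      (pvP_succ nums a (by omega)).symm]
    rw [show ((a : Int) + 1) = (((a + 1 : Nat)) : Int) by push_cast; ring]
    rw [PySem.List.pySetD_natCast]
    rw [ih (a + 1) (tbl.set a (pvP nums ((a + 1 : Nat) : Int))) (by omega) (by simp [htbl])]
    rw [pv_take_succ_set tbl a (by omega)]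
    rw [List.range_succ_eq_map, List.append_assoc]
    simp only [List.map_cons, List.map_map, List.singleton_append]
    congr 1
    rw [show a + 0 + 1 = a + 1 from rfl]
    congr 1
    apply List.map_congr_left
    intro j _
    simp only [Function.comp_apply]
    congr 2
    omega

lemma pvGetMapRange (f : Nat → Int) (n : Nat) (i : Int) (h0 : 0 ≤ i) (h : i < (n : Int)) :
    PySem.List.pyGetD ((List.range n).map f) i 0 = f i.toNat := by
  rw [PySem.List.pyGetD_eq_getElem _ 0 h0 (by simpa using h)]
  simp

lemma pvA_norm (nums : List Int) :
    dfs nums = (PySem.List.pyRange 1 (nums.length : Int) 1).foldl (pvStep nums) [] := by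
  have hlen : ((PySem.List.pyRange 0 (nums.length : Int) 1).map (fun _ => (0 : Int))).length
      = nums.length := by simp [PySem.List.pyRange_one]
  have htbl := pvTableA nums nums.length 0
    ((PySem.List.pyRange 0 (nums.length : Int) 1).map (fun _ => (0 : Int))) (by omega) hlen
  rw [show pvP nums ((0 : Nat) : Int) = 0 by simp [pvP]] at htbl
  rw [List.take_zero, List.nil_append] at htbl
  simp only [Nat.zero_add, Nat.cast_zero] at htbl
  simp only [dfs]
  rw [htbl]
  apply PySem.List.foldl_congr_mem
  intro acc i hi
  obtain ⟨h1, h2⟩ := (PySem.List.mem_pyRange_one).1 hi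
  rw [pvGetMapRange _ _ _ (by omega) (by omega)]
  rw [pvGetMapRange _ _ _ (by omega) (by omega)]
  rw [show ((i - 1).toNat + 1 : Nat) = i.toNat by omega]
  rw [show ((i.toNat + 1 : Nat) : Int) = i + 1 by omega]
  rw [show ((i.toNat : Nat) : Int) = i by omega]
  rfl

-- updating with a deduplicated list updates with the raw list
lemma pvUpdate_ofList (s : PySem.Set Int) (xs : List Int) :
    PySem.Set.update s (PySem.Set.ofList xs) = PySem.Set.update s xs := by
  rw [PySem.Set.update_eq_append_filter, PySem.Set.update_eq_append_filter,
    PySem.Set.ofList_ofList]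

lemma pvCands_append (total : Int) :
    ∀ (l r : List Int) (base : Int),
      pvCands total base (l ++ r) = pvCands total base l ++ pvCands total (base + l.sum) r := by
  intro l
  induction l with
  | nil => intro r base; simp [pvCands]
  | cons x xs ih =>
    intro r base
    simp only [List.cons_append, pvCands, List.append_assoc]
    rw [ih r (base + x)]
    simp [add_assoc]

lemma pvGo_eq (total : Int) :
    ∀ (seg : List Int) (base : Int),
      dfsAltGo total base seg = PySem.Set.ofList (pvCands total base seg) := by
  intro seg
  induction seg using (fun motive h seg => Nat.strongRecOn (motive := fun n => ∀ seg : List Int, seg.length = n → motive seg) seg.length (fun n ih seg hlen => h seg (fun t ht => ih t.length (hlen ▸ ht) t rfl)) seg rfl :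
    ∀ (motive : List Int → Prop),
      (∀ seg : List Int, (∀ t : List Int, t.length < seg.length → motive t) → motive seg) →
      ∀ seg : List Int, motive seg) with
  | _ seg ih =>
    intro base
    rw [dfsAltGo]
    by_cases h0 : seg = []
    · subst h0; simp [pvCands, PySem.Set.ofList]
    · rw [if_neg h0]
      by_cases h1 : seg.length = 1
      · rw [if_pos h1]
        obtain ⟨x, hx⟩ : ∃ x, seg = [x] := by
          cases seg with
          | nil => simp at h1
          | cons y ys => exact ⟨y, by simp at h1; simp [h1]⟩
        subst hx
        by_cases hc : 2 * base + x = total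
        · rw [if_pos (by simpa [PySem.List.pyGetD] using hc)]
          simp [pvCands, hc, PySem.Set.ofList, PySem.Set.add, PySem.Set.empty]
        · rw [if_neg (by simpa [PySem.List.pyGetD] using hc)]
          simp [pvCands, hc, PySem.Set.ofList, PySem.Set.empty]
      · rw [if_neg h1]
        have hm : PySem.Int.floordiv ((seg.length : Nat) : Int) 2 = (((seg.length / 2 : Nat)) : Int) := by
          simp [PySem.Int.floordiv, Int.fdiv_eq_ediv]
        have hne : seg.length ≠ 0 := fun h => h0 (List.eq_nil_of_length_eq_zero h)
        simp only [hm, PySem.List.slice_to_natCast, PySem.List.slice_from_natCast]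
        rw [ih (seg.take (seg.length / 2)) (by rw [List.length_take]; omega) base,
          ih (seg.drop (seg.length / 2)) (by rw [List.length_drop]; omega)]
        show PySem.Set.update _ _ = _
        rw [pvUpdate_ofList, ← PySem.Set.ofList_append, ← pvCands_append,
          List.take_append_drop]

-- A's fold from index a equals updating with the candidates of the tail segment
lemma pvFoldA (nums : List Int) :
    ∀ (k a : Nat) (s : List Int), 1 ≤ a → a + k = nums.length →
    (PySem.List.pyRange (a : Int) (nums.length : Int) 1).foldl (pvStep nums) s
      = PySem.Set.update s (pvCands nums.sum (pvP nums a) (nums.drop a)) := by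
  intro k
  induction k with
  | zero =>
    intro a s h1 ha
    rw [PySem.List.pyRange_one_eq_nil (by omega)]
    simp [List.drop_eq_nil_of_le (by omega : nums.length ≤ a), pvCands, PySem.Set.update]
  | succ k ih =>
    intro a s h1 ha
    have halt : a < nums.length := by omega
    rw [PySem.List.pyRange_one_cons (by omega : (a : Int) < (nums.length : Int))]
    rw [List.foldl_cons]
    rw [List.drop_eq_getElem_cons halt]
    have hget : nums[a] = PySem.List.pyGetD nums (a : Int) 0 := by
      rw [PySem.List.pyGetD_natCast]
      simp [List.getD, List.getElem?_eq_getElem halt]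
    have hx := pvP_succ nums a halt
    have hstep : pvStep nums s (a : Int)
        = if 2 * pvP nums a + nums[a] = nums.sum then PySem.Set.add s (pvP nums a) else s := by
      simp only [pvStep]
      rw [if_congr (show (nums.sum - pvP nums ((a : Int) + 1) = pvP nums a)
            ↔ (2 * pvP nums a + nums[a] = nums.sum) by rw [hx, ← hget]; omega) rfl rfl]
    simp only [pvCands]
    by_cases hc : 2 * pvP nums a + nums[a] = nums.sum
    · rw [if_pos hc, List.singleton_append, PySem.Set.update_cons]
      rw [hstep, if_pos hc]
      have hrec : pvP nums a + nums[a] = pvP nums (((a + 1 : Nat)) : Int) := by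
        rw [show (((a + 1 : Nat)) : Int) = (a : Int) + 1 by push_cast; ring, hx, hget]
      rw [hrec]
      rw [show ((a : Int) + 1) = (((a + 1 : Nat)) : Int) by push_cast; ring]
      exact ih (a + 1) _ (by omega) (by omega)
    · rw [if_neg hc, List.nil_append]
      rw [hstep, if_neg hc]
      have hrec : pvP nums a + nums[a] = pvP nums (((a + 1 : Nat)) : Int) := by
        rw [show (((a + 1 : Nat)) : Int) = (a : Int) + 1 by push_cast; ring, hx, hget]
      rw [hrec]
      rw [show ((a : Int) + 1) = (((a + 1 : Nat)) : Int) by push_cast; ring]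
      exact ih (a + 1) _ (by omega) (by omega)

lemma pvB_norm (nums : List Int) :
    dfs_alt nums = (PySem.List.pyRange 1 (nums.length : Int) 1).foldl (pvStep nums) [] := by
  cases nums with
  | nil => simp [dfs_alt, PySem.Set.empty, PySem.List.pyRange_one_eq_nil]
  | cons x xs =>
    have h1 : pvP (x :: xs) ((1 : Nat) : Int) = x := by simp [pvP]
    have := pvFoldA (x :: xs) xs.length 1 [] (by omega) (by simp [List.length_cons]; omega)
    rw [show ((1 : Nat) : Int) = (1 : Int) by norm_num] at this
    rw [this]
    rw [show pvP (x :: xs) (1 : Int) = x by simpa using h1]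
    show dfs_alt (x :: xs) = PySem.Set.update [] (pvCands (x :: xs).sum x xs)
    rw [PySem.Set.update_nil_left]
    simp only [dfs_alt]
    exact pvGo_eq (x :: xs).sum xs x

-- ===== VERDICT (by name: the statement is the Claim_ definition above) =====
theorem dfs_spec : Claim_equal_dfs := by
  intro nums _
  unfold Spec_dfs
  rw [pvA_norm, pvB_norm]
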